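-- pv_equiv track=rewrite | github.com/salisburytristan-arch/DataAI | packages/core/src/curriculum.py | kolmogorov_complexity_estimate
-- ===== SOURCE A (Python) =====
-- from typing import List, Tuple, Dict, Callable
--
-- def kolmogorov_complexity_estimate(data: List[int]) -> int:
--     """
--     Estimate Kolmogorov complexity: length of shortest program to generate data.
--     Uses simple heuristic: compress with BLOB-T and measure result size.
--     """
--     # Find repeating patterns
--     pattern_count = 0
--     i = 0
--     compressed_size = 0
--
--     while i < len(data):
--         # Look for longest repeat
--         found_repeat = False
--         for pattern_len in range(min(10, len(data) - i), 0, -1):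
--             pattern = tuple(data[i:i+pattern_len])
--             # Count occurrences after position i
--             occurrences = sum(1 for j in range(i+1, len(data)-pattern_len+1)
--                             if tuple(data[j:j+pattern_len]) == pattern)
--             if occurrences > 0:
--                 compressed_size += pattern_len + 2  # Pattern + count reference
--                 i += pattern_len
--                 found_repeat = True
--                 break
--
--         if not found_repeat:
--             compressed_size += 1
--             i += 1
--
--     return compressed_size
-- ===== SOURCE B (Python) =====
-- def kolmogorov_complexity_estimate(data):
--     """
--     Two staged passes instead of per-position rescans: for each pattern length
--     L = 1..10 a single right-to-left sweep with a 'seen windows' set records in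
--     `best` the largest L whose window at position j reappears later; the final
--     walk then just reads best[i]. O(n) total vs A's O(n^2).
--     """
--     n = len(data)
--     best = {}  # position -> largest L in 1..10 whose window repeats later
--     for L in range(1, 11):
--         seen = set()
--         for j in range(n - L, -1, -1):
--             w = tuple(data[j:j+L])
--             if w in seen:
--                 best[j] = L  # L ascends, so later passes overwrite with the max
--             seen.add(w)
--     size = 0
--     i = 0
--     while i < n:
--         L = best.get(i, 0)
--         if L > 0:
--             size += L + 2
--             i += L
--         else:
--             size += 1
--             i += 1
--     return size
-- ===== Notes on version B (the rewrite author's own statement) =====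
-- stated objective: faster
-- what changed: A's per-position inner rescan (counting later occurrences for each candidate length) is replaced by ten right-to-left sweeps, each carrying a seen-window set and recording into a best-length table, followed by a table-driven greedy walk with no searching at all.
import Mathlib
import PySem

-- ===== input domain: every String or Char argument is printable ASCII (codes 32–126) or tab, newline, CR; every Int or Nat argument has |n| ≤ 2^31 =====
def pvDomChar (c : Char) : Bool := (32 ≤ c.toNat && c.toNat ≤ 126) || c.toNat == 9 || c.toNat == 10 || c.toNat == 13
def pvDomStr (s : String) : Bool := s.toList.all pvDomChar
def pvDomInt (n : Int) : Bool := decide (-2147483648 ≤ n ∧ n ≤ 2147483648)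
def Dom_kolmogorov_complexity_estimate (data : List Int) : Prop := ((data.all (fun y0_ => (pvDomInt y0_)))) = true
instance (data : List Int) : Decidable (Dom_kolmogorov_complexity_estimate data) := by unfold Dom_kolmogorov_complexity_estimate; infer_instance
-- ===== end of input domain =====

-- B replaces A's per-position rescan (counting later occurrences for each candidate
-- length) by ten right-to-left sweeps that record, in a best-length table, the largest
-- window length repeating later at each position; the final greedy walk just reads the
-- table. Both compute the same greedy compressed-size estimate.

-- ===== PORT A =====

-- occurrences = sum(1 for j in range(i+1, len(data)-pattern_len+1) if tuple(data[j:j+pattern_len]) == pattern)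
def pvOccA (data : List Int) (i L : Int) : Int :=
  ((PySem.List.pyRange (i + 1) ((data.length : Int) - L + 1)).map
    (fun j => if PySem.List.slice data (some j) (some (j + L)) =
                 PySem.List.slice data (some i) (some (i + L)) then (1 : Int) else 0)).sum

-- the 'while i < len(data)' loop; the inner 'for pattern_len in range(min(10,...), 0, -1)'
-- with its break is the first length whose occurrence count is positive (List.find?)
def pvLoopA (data : List Int) (i : Nat) (size : Int) : Int :=
  if _h : i < data.length then
    match hf : (PySem.List.pyRange (min 10 ((data.length : Int) - (i : Int))) 0 (-1)).find?
        (fun L => decide (0 < pvOccA data (i : Int) L)) with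
    | some L => pvLoopA data (i + L.toNat) (size + L + 2)
    | none => pvLoopA data (i + 1) (size + 1)
  else size
termination_by data.length - i
decreasing_by
  · have hm := (PySem.List.mem_pyRange_neg_one).mp (List.mem_of_find?_eq_some hf)
    omega
  · omega

def kolmogorov_complexity_estimate (data : List Int) : Int :=
  pvLoopA data 0 0

-- ===== PORT B =====

-- one step of the inner sweep 'for j in range(n - L, -1, -1)': check the seen-set,
-- record L for a repeat, add the window
def pvStep (data : List Int) (L : Int)
    (st : PySem.Dict Int Int × PySem.Set (List Int)) (j : Int) :
    PySem.Dict Int Int × PySem.Set (List Int) :=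
  let w := PySem.List.slice data (some j) (some (j + L))
  (if st.2.contains w then st.1.insert j L else st.1, PySem.Set.add st.2 w)

-- one pass 'for L in range(1, 11)' body: sweep j right-to-left with a fresh seen-set
def pvPass (data : List Int) (best : PySem.Dict Int Int) (L : Int) : PySem.Dict Int Int :=
  ((PySem.List.pyRange ((data.length : Int) - L) (-1) (-1)).foldl
    (pvStep data L) (best, PySem.Set.empty)).1

-- best = {} then the ten passes
def pvBest (data : List Int) : PySem.Dict Int Int :=
  (PySem.List.pyRange 1 11).foldl (pvPass data) PySem.Dict.empty

-- the final walk: size/i loop driven by best.get(i, 0)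
def pvWalk (data : List Int) (best : PySem.Dict Int Int) (i : Nat) (size : Int) : Int :=
  if _h : i < data.length then
    let L := best.getD (i : Int) 0
    if hL : 0 < L then pvWalk data best (i + L.toNat) (size + L + 2)
    else pvWalk data best (i + 1) (size + 1)
  else size
termination_by data.length - i
decreasing_by
  · omega
  · omega

def kolmogorov_complexity_estimate_alt (data : List Int) : Int :=
  pvWalk data (pvBest data) 0 0

-- ===== PRECONDITION & SPEC =====
def Spec_kolmogorov_complexity_estimate (data : List Int) (out : Int) : Prop := out = kolmogorov_complexity_estimate_alt data
instance (data : List Int) (out : Int) : Decidable (Spec_kolmogorov_complexity_estimate data out) := by unfold Spec_kolmogorov_complexity_estimate; infer_instance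

-- ===== CLAIM (what is proved, stated in full; the proofs are below) =====
def Claim_equal_kolmogorov_complexity_estimate : Prop := ∀ (data : List Int), Dom_kolmogorov_complexity_estimate data → Spec_kolmogorov_complexity_estimate data (kolmogorov_complexity_estimate data)

-- ===== LEMMAS AND PROOFS =====

-- "window at i has a later occurrence within the bound", the condition both programs test
def pvRep (data : List Int) (i L : Int) : Prop :=
  ∃ j : Int, i < j ∧ j ≤ (data.length : Int) - L ∧
    PySem.List.slice data (some j) (some (j + L)) =
      PySem.List.slice data (some i) (some (i + L))

-- A's occurrence count is positive iff the window repeats later within the bound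
lemma pvOccA_pos_iff (data : List Int) (i L : Int) :
    (0 < pvOccA data i L) ↔ pvRep data i L := by
  unfold pvOccA pvRep
  have hs := PySem.List.sum_map_ite_one_zero
    (fun j => decide (PySem.List.slice data (some j) (some (j + L)) =
        PySem.List.slice data (some i) (some (i + L))))
    (PySem.List.pyRange (i + 1) ((data.length : Int) - L + 1))
  simp only [decide_eq_true_eq] at hs
  rw [hs]
  rw [show (0 : Int) < (List.countP _ _ : Nat) ↔
      0 < List.countP (fun j => decide (PySem.List.slice data (some j) (some (j + L)) =
        PySem.List.slice data (some i) (some (i + L))))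
        (PySem.List.pyRange (i + 1) ((data.length : Int) - L + 1)) from Int.natCast_pos]
  rw [List.countP_pos_iff]
  constructor
  · rintro ⟨j, hj, hjp⟩
    have := PySem.List.mem_pyRange_one.mp hj
    exact ⟨j, by omega, by omega, by simpa using hjp⟩
  · rintro ⟨j, hj1, hj2, hj3⟩
    exact ⟨j, PySem.List.mem_pyRange_one.mpr ⟨by omega, by omega⟩, by simpa using hj3⟩

-- the sweep of pass L, from start index a down to 0: positions with a later repeat get L,
-- every other key keeps its old binding
lemma pvSweep_get? (data : List Int) (L : Int) : ∀ (m : Nat) (a : Int), a < (m : Int) →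
    a ≤ (data.length : Int) - L →
    ∀ (best : PySem.Dict Int Int) (seen : PySem.Set (List Int)),
    (∀ x, x ∈ seen ↔ ∃ j : Int, a < j ∧ j ≤ (data.length : Int) - L ∧
        PySem.List.slice data (some j) (some (j + L)) = x) →
    ∀ i : Int,
      ((0 ≤ i ∧ i ≤ a ∧ pvRep data i L) →
        (((PySem.List.pyRange a (-1) (-1)).foldl (pvStep data L) (best, seen)).1.get? i = some L)) ∧
      (¬ (0 ≤ i ∧ i ≤ a ∧ pvRep data i L) →
        (((PySem.List.pyRange a (-1) (-1)).foldl (pvStep data L) (best, seen)).1.get? i = best.get? i)) := by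
  intro m
  induction m with
  | zero =>
    intro a ha _ best seen _ i
    rw [PySem.List.pyRange_neg_one_eq_nil (by omega)]
    exact ⟨fun h => absurd h (by omega), fun _ => rfl⟩
  | succ k ih =>
    intro a ha hbnd best seen hseen i
    by_cases ha0 : a < 0
    · rw [PySem.List.pyRange_neg_one_eq_nil (by omega)]
      exact ⟨fun h => absurd h (by omega), fun _ => rfl⟩
    · rw [PySem.List.pyRange_neg_one_cons (by omega), List.foldl_cons]
      set w := PySem.List.slice data (some a) (some (a + L)) with hw
      have hstep : pvStep data L (best, seen) a =
          (if seen.contains w then best.insert a L else best, PySem.Set.add seen w) := rfl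
      rw [hstep]
      set best' := if seen.contains w then best.insert a L else best with hbest'
      have hseen' : ∀ x, x ∈ PySem.Set.add seen w ↔
          ∃ j : Int, a - 1 < j ∧ j ≤ (data.length : Int) - L ∧
            PySem.List.slice data (some j) (some (j + L)) = x := by
        intro x
        rw [PySem.Set.mem_add, hseen x]
        constructor
        · rintro (⟨j, h1, h2, h3⟩ | hx)
          · exact ⟨j, by omega, h2, h3⟩
          · exact ⟨a, by omega, hbnd, hx ▸ rfl⟩
        · rintro ⟨j, h1, h2, h3⟩
          by_cases hja : j = a
          · exact Or.inr (by rw [← h3, hja])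
          · exact Or.inl ⟨j, by omega, h2, h3⟩
      have IH := ih (a - 1) (by omega) (by omega) best' (PySem.Set.add seen w) hseen'
      -- the condition at position a is exactly membership of w in seen
      have hwP : pvRep data a L ↔ seen.contains w = true := by
        rw [PySem.Set.contains_iff, hseen w]
        unfold pvRep
        exact Iff.rfl
      by_cases hP' : 0 ≤ i ∧ i ≤ a - 1 ∧ pvRep data i L
      · exact ⟨fun _ => (IH i).1 hP', fun h => absurd ⟨hP'.1, by omega, hP'.2.2⟩ h⟩
      · have hrest := (IH i).2 hP'
        by_cases hia : i = a
        · subst hia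
          constructor
          · rintro ⟨h0, _, hrep⟩
            rw [hrest, hbest']
            rw [if_pos (hwP.mp hrep)]
            exact PySem.Dict.get?_insert_self best i L
          · intro hnot
            rw [hrest, hbest']
            have hnrep : ¬ pvRep data i L := fun hr => hnot ⟨by omega, le_refl i, hr⟩
            rw [if_neg (fun hc => hnrep (hwP.mpr hc))]
        · have hnP : ¬ (0 ≤ i ∧ i ≤ a ∧ pvRep data i L) := by
            intro ⟨h0, h1, h2⟩
            exact hP' ⟨h0, by omega, h2⟩
          refine ⟨fun h => absurd h hnP, fun _ => ?_⟩
          rw [hrest, hbest']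
          by_cases hc : seen.contains w
          · rw [if_pos hc]
            exact PySem.Dict.get?_insert_of_ne best L hia
          · rw [if_neg hc]

-- one whole pass: positions with a later repeat of length L get L, others keep best
lemma pvPass_get? (data : List Int) (best : PySem.Dict Int Int) (L i : Int) :
    ((0 ≤ i ∧ pvRep data i L) → (pvPass data best L).get? i = some L) ∧
    (¬ (0 ≤ i ∧ pvRep data i L) → (pvPass data best L).get? i = best.get? i) := by
  have hempty : ∀ x : List Int, x ∈ (PySem.Set.empty : PySem.Set (List Int)) ↔
      ∃ j : Int, (data.length : Int) - L < j ∧ j ≤ (data.length : Int) - L ∧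
        PySem.List.slice data (some j) (some (j + L)) = x := by
    intro x
    constructor
    · intro h; exact absurd h (List.not_mem_nil)
    · rintro ⟨j, h1, h2, -⟩; omega
  have H := pvSweep_get? data L ((data.length : Int) - L + 1).toNat ((data.length : Int) - L)
    (by omega) (le_refl _) best PySem.Set.empty hempty i
  unfold pvPass
  have hbd : (0 ≤ i ∧ i ≤ (data.length : Int) - L ∧ pvRep data i L) ↔ (0 ≤ i ∧ pvRep data i L) := by
    constructor
    · rintro ⟨h0, _, h2⟩; exact ⟨h0, h2⟩
    · rintro ⟨h0, h2⟩
      obtain ⟨j, hj1, hj2, -⟩ := id h2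
      exact ⟨h0, by omega, h2⟩
  exact ⟨fun h => H.1 (hbd.mpr h), fun h => H.2 (fun hc => h (hbd.mp hc))⟩

-- chaining the passes: the table lookup is the LAST length in ls that repeats,
-- i.e. find? over the reversed pass list
lemma pvFold_get? (data : List Int) (i : Int) (hi : 0 ≤ i) :
    ∀ (ls : List Int) (d : PySem.Dict Int Int),
      (ls.foldl (pvPass data) d).get? i =
        (ls.reverse.find? (fun L => decide (0 < pvOccA data i L))).or (d.get? i) := by
  intro ls
  induction ls with
  | nil => intro d; simp
  | cons L ls ih =>
    intro d
    rw [List.foldl_cons, ih, List.reverse_cons, List.find?_append]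
    cases hf : ls.reverse.find? (fun L => decide (0 < pvOccA data i L)) with
    | some M => rfl
    | none =>
      simp only [Option.none_or, List.find?]
      by_cases hp : 0 < pvOccA data i L
      · rw [show (decide (0 < pvOccA data i L)) = true by simpa using hp]
        simp only [Option.some_or]
        exact (pvPass_get? data d L i).1 ⟨hi, (pvOccA_pos_iff data i L).mp hp⟩
      · rw [show (decide (0 < pvOccA data i L)) = false by simpa using hp]
        simp only [Option.none_or]
        exact (pvPass_get? data d L i).2 (fun hc => hp ((pvOccA_pos_iff data i L).mpr hc.2))

-- the table lookup equals A's descending search over lengths 10..1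
lemma pvBest_get? (data : List Int) (i : Int) (hi : 0 ≤ i) :
    (pvBest data).get? i =
      (PySem.List.pyRange 10 0 (-1)).find? (fun L => decide (0 < pvOccA data i L)) := by
  unfold pvBest
  rw [pvFold_get? data i hi, PySem.Dict.get?_empty, Option.or_none,
    PySem.List.pyRange_neg_one_eq_reverse]
  norm_num

-- A's search never succeeds at a length exceeding the remaining suffix,
-- so searching 10..1 equals searching min(10, n-i)..1
lemma pvFind_min (data : List Int) (i : Nat) (h : i < data.length) :
    (PySem.List.pyRange (min 10 ((data.length : Int) - (i : Int))) 0 (-1)).find?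
        (fun L => decide (0 < pvOccA data (i : Int) L)) =
    (PySem.List.pyRange 10 0 (-1)).find? (fun L => decide (0 < pvOccA data (i : Int) L)) := by
  set m := min 10 ((data.length : Int) - (i : Int)) with hm
  have hm1 : 1 ≤ m := by omega
  have hsplit : PySem.List.pyRange 1 11 = PySem.List.pyRange 1 (m + 1) ++ PySem.List.pyRange (m + 1) 11 := by
    exact PySem.List.pyRange_one_append 1 (m + 1) 11 (by omega) (by omega)
  have h10 : PySem.List.pyRange 10 0 (-1) = (PySem.List.pyRange 1 11).reverse := by
    rw [PySem.List.pyRange_neg_one_eq_reverse]; norm_num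
  have hmr : PySem.List.pyRange m 0 (-1) = (PySem.List.pyRange 1 (m + 1)).reverse := by
    rw [PySem.List.pyRange_neg_one_eq_reverse]; norm_num
  rw [h10, hsplit, List.reverse_append, List.find?_append, ← hmr]
  have hnone : (PySem.List.pyRange (m + 1) 11).reverse.find?
      (fun L => decide (0 < pvOccA data (i : Int) L)) = none := by
    rw [List.find?_eq_none]
    intro L hL
    rw [List.mem_reverse, PySem.List.mem_pyRange_one] at hL
    simp only [decide_eq_true_eq]
    intro hp
    obtain ⟨j, hj1, hj2, -⟩ := (pvOccA_pos_iff data (i : Int) L).mp hp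
    omega
  rw [hnone, Option.none_or]

-- the two main loops compute the same value
lemma pvLoop_eq (data : List Int) :
    ∀ (k i : Nat), data.length - i ≤ k → ∀ (size : Int),
      pvLoopA data i size = pvWalk data (pvBest data) i size := by
  intro k
  induction k with
  | zero =>
    intro i hk size
    rw [pvLoopA, pvWalk]
    rw [dif_neg (by omega), dif_neg (by omega)]
  | succ k ih =>
    intro i hk size
    rw [pvLoopA, pvWalk]
    by_cases h : i < data.length
    · rw [dif_pos h, dif_pos h]
      have hkey : (pvBest data).getD (i : Int) 0 =
          ((PySem.List.pyRange (min 10 ((data.length : Int) - (i : Int))) 0 (-1)).find?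
            (fun L => decide (0 < pvOccA data (i : Int) L))).getD 0 := by
        rw [PySem.Dict.getD_eq_get?_getD, pvBest_get? data (i : Int) (by omega), pvFind_min data i h]
      cases hf : (PySem.List.pyRange (min 10 ((data.length : Int) - (i : Int))) 0 (-1)).find?
          (fun L => decide (0 < pvOccA data (i : Int) L)) with
      | none =>
        have h0 : (pvBest data).getD (i : Int) 0 = 0 := by rw [hkey, hf]; rfl
        simp only [h0]
        rw [dif_neg (by omega)]
        exact ih (i + 1) (by omega) (size + 1)
      | some L =>
        have hm := PySem.List.mem_pyRange_neg_one.mp (List.mem_of_find?_eq_some hf)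
        have hL : (pvBest data).getD (i : Int) 0 = L := by rw [hkey, hf]; rfl
        simp only [hL]
        rw [dif_pos (by omega)]
        exact ih (i + L.toNat) (by omega) (size + L + 2)
    · rw [dif_neg h, dif_neg h]

-- ===== VERDICT (by name: the statement is the Claim_ definition above) =====
theorem kolmogorov_complexity_estimate_spec : Claim_equal_kolmogorov_complexity_estimate := by
  intro data _
  unfold Spec_kolmogorov_complexity_estimate kolmogorov_complexity_estimate
    kolmogorov_complexity_estimate_alt
  exact pvLoop_eq data data.length 0 (by omega) 0
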